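-- pv_equiv track=rewrite | github.com/liangyirui/python-algorithms | src/arrays/min_end.py | min_end
-- ===== SOURCE A (Python) =====
-- def min_end(n: int, x: int) -> int:
--     bit_x = bit_n = 1
--     while bit_n < n:
--         if (bit_x & x) == 0:
--             if bit_n & (n - 1):
--                 x += bit_x
--             bit_n <<= 1
--         bit_x <<= 1
--     return x
-- ===== SOURCE B (Python) =====
-- def min_end(n: int, x: int) -> int:
--     # Destruct-and-rebuild with an explicit stack: peel the low bit of x (taking a
--     # bit of m where x's bit is free), then rebuild the result back-to-front.
--     m = n - 1
--     bits = []
--     while m > 0: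
--         if x & 1:
--             bits.append(1)
--         else:
--             bits.append(m & 1)
--             m >>= 1
--         x >>= 1
--     for b in reversed(bits):
--         x = 2 * x + b
--     return x
-- ===== Notes on version B (the rewrite author's own statement) =====
-- stated objective: alternative
-- what changed: A's single-phase in-place mask walk (bit_x/bit_n masks shifted upward, x += bit_x mutating x) is replaced by a two-phase destruct-and-rebuild with an explicit stack: peel x's low bits into a list (taking a bit of n-1 whenever x's bit is free), then rebuild the result back-to-front as 2*r + bit; no masks, no in-place bit insertion.
import Mathlib
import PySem

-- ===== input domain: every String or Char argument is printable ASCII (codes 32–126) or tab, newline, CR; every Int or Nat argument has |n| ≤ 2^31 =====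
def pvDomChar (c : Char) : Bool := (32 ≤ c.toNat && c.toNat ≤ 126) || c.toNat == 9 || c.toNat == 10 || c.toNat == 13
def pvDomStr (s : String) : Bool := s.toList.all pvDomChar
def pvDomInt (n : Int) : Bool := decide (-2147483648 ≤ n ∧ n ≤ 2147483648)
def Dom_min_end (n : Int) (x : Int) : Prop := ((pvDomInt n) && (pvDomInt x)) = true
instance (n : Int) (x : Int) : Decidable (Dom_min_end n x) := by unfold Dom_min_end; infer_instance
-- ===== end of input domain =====

-- B replaces A's in-place mask walk (bit_x/bit_n masks, x += bit_x) by a two-phase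
-- destruct-and-rebuild with an explicit stack: peel x's low bits into a list (taking a
-- bit of n-1 where x's bit is free), then rebuild the result back-to-front as 2*r + bit;
-- objective: alternative (same cost).


-- fuel for A's while-loop and B's peel loop (the two Pythons diverge on exactly the
-- same inputs — n > 1 and x with fewer zero bits than (n-1).bit_length() — and the two
-- ports consume fuel in lockstep, one tick per low bit of x examined, so the proved
-- equality holds for EVERY fuel, divergent inputs included)
def pvFuel : Nat := 4294967296

-- ===== PORT A =====
-- while bit_n < n: if (bit_x & x) == 0: (if bit_n & (n-1): x += bit_x); bit_n <<= 1
--                  bit_x <<= 1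
def minEndLoop : Nat → Int → Int → Int → Int → Int
  | 0, _, x, _, _ => x
  | (fuel+1), n, x, bx, bn =>
    if bn < n then
      if PySem.Int.band bx x = 0 then
        minEndLoop fuel n (if PySem.Int.band bn (n-1) ≠ 0 then x + bx else x)
          (bx <<< (1:Nat)) (bn <<< (1:Nat))
      else
        minEndLoop fuel n x (bx <<< (1:Nat)) bn
    else x

def min_end (n : Int) (x : Int) : Int := minEndLoop pvFuel n x 1 1

-- ===== PORT B =====
-- while m > 0: if x & 1: bits.append(1)
--              else: bits.append(m & 1); m >>= 1
--              x >>= 1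
def peelLoop : Nat → Int → Int → List Int × Int
  | 0, _, x => ([], x)
  | (fuel+1), m, x =>
    if m ≤ 0 then ([], x)
    else if PySem.Int.band x 1 ≠ 0 then
      let r := peelLoop fuel m (x >>> (1:Nat))
      (1 :: r.1, r.2)
    else
      let r := peelLoop fuel (m >>> (1:Nat)) (x >>> (1:Nat))
      (PySem.Int.band m 1 :: r.1, r.2)

-- for b in reversed(bits): x = 2 * x + b
def min_end_alt (n : Int) (x : Int) : Int :=
  let r := peelLoop pvFuel (n-1) x
  r.1.reverse.foldl (fun acc b => 2 * acc + b) r.2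

-- ===== PRECONDITION & SPEC =====
-- No Pre_: on every input where either Python returns, both return the same value; on
-- n > 1 with x having fewer zero bits than (n-1).bit_length() both loops run forever
-- (neither ever returns), and the fuelled ports are equal there as well.
def Spec_min_end (n : Int) (x : Int) (out : Int) : Prop := out = min_end_alt n x
instance (n : Int) (x : Int) (out : Int) : Decidable (Spec_min_end n x out) := by unfold Spec_min_end; infer_instance

-- ===== CLAIM (what is proved, stated in full; the proofs are below) =====
def Claim_equal_min_end : Prop := ∀ (n : Int) (x : Int), Dom_min_end n x → Spec_min_end n x (min_end n x)

-- ===== LEMMAS AND PROOFS =====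

-- proof-side recursive form of B: peel-and-rebuild fused into one recursion
def scatterRec : Nat → Int → Int → Int
  | 0, _, x => x
  | (fuel+1), m, x =>
    if m ≤ 0 then x
    else if PySem.Int.band x 1 ≠ 0 then
      2 * scatterRec fuel m (x >>> (1:Nat)) + 1
    else
      2 * scatterRec fuel (m >>> (1:Nat)) (x >>> (1:Nat)) + PySem.Int.band m 1

-- B's two phases compute scatterRec
lemma rebuild_peel (fuel : Nat) : ∀ (m x : Int),
    (peelLoop fuel m x).1.reverse.foldl (fun acc b => 2 * acc + b) (peelLoop fuel m x).2
      = scatterRec fuel m x := by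
  induction fuel with
  | zero => intro m x; simp [peelLoop, scatterRec]
  | succ fuel ih =>
    intro m x
    simp only [peelLoop, scatterRec]
    split_ifs with h1 h2
    · simp
    · simp only [List.reverse_cons, List.foldl_append, List.foldl_cons, List.foldl_nil, ih]
    · simp only [List.reverse_cons, List.foldl_append, List.foldl_cons, List.foldl_nil, ih]

-- A's zero-bit test: bit_x & x == 0  with bit_x = 2^p
lemma band_pow_eq_zero (x : Int) (p : Nat) :
    (PySem.Int.band (2^p) x = 0) ↔ x.testBit p = false := by
  have h2 : ((2:Int)^p) = ((2^p : Nat) : Int) := by push_cast; ring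
  cases x with
  | ofNat nn =>
    rw [h2, Int.ofNat_eq_natCast, PySem.Int.band_natCast, Nat.two_pow_and]
    show _ ↔ nn.testBit p = false
    have hp : (0:Nat) < 2^p := Nat.two_pow_pos p
    cases nn.testBit p <;> simp
  | negSucc mm =>
    have hneg : ¬ (0 ≤ Int.negSucc mm) := by simp [Int.negSucc_eq]; omega
    have hc : (-(Int.negSucc mm) - 1).toNat = mm := by
      rw [Int.negSucc_eq]; simp
    rw [h2]
    show _ ↔ (!mm.testBit p) = false
    have hval : PySem.Int.band ((2^p : Nat) : Int) (Int.negSucc mm) = ↑(2^p - (2^p &&& mm)) := by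
      simp [PySem.Int.band, hneg, Int.toNat_natCast]
      have ht : ((2:Int)^p).toNat = 2^p := by exact Nat.add_zero (NatPow.pow 2 p)
      rw [ht]
    rw [hval, Nat.two_pow_and]
    have hp : (0:Nat) < 2^p := Nat.two_pow_pos p
    cases mm.testBit p <;> simp

-- B's low-bit test: y & 1 == 0
lemma band_one_eq_zero (y : Int) :
    (PySem.Int.band y 1 = 0) ↔ y.testBit 0 = false := by
  cases y with
  | ofNat nn =>
    have h1 : (1:Int) = ((1:Nat) : Int) := rfl
    rw [Int.ofNat_eq_natCast, h1, PySem.Int.band_natCast]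
    show _ ↔ nn.testBit 0 = false
    have h : nn &&& 1 = (nn.testBit 0).toNat := by
      simpa using Nat.and_two_pow nn 0
    rw [h]
    cases nn.testBit 0 <;> simp
  | negSucc mm =>
    have hneg : ¬ (0 ≤ Int.negSucc mm) := by simp [Int.negSucc_eq]; omega
    show _ ↔ (!mm.testBit 0) = false
    have hval : PySem.Int.band (Int.negSucc mm) 1 = ↑(1 - (1 &&& mm)) := by
      simp [PySem.Int.band, hneg]
    rw [hval]
    have h : 1 &&& mm = (mm.testBit 0).toNat := by
      simpa using Nat.two_pow_and mm 0
    rw [h]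
    cases mm.testBit 0 <;> simp

lemma shiftRight_testBit_zero (x : Int) (p : Nat) : (x >>> p).testBit 0 = x.testBit p := by
  cases x with
  | ofNat nn =>
    show (nn >>> p).testBit 0 = nn.testBit p
    simp
  | negSucc mm =>
    show (!(mm >>> p).testBit 0) = (!mm.testBit p)
    simp

lemma pow_shift_one (p : Nat) : ((2:Int)^p) <<< (1:Nat) = 2^(p+1) := by
  rw [Int.shiftLeft_eq]; ring

-- x & 1 is 0 or 1
lemma band1_dichotomy (y : Int) : PySem.Int.band y 1 = 0 ∨ PySem.Int.band y 1 = 1 := by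
  have h := PySem.Int.band_one y
  have h0 := PySem.Int.mod_nonneg y (b := 2) (by norm_num)
  have h1 := PySem.Int.mod_lt y (b := 2) (by norm_num)
  omega

lemma shiftRight_zero_int (x : Int) : x >>> (0:Nat) = x := by
  cases x with
  | ofNat nn => show (Int.ofNat (nn >>> 0)) = _; simp
  | negSucc mm => show Int.negSucc (mm >>> 0) = _; simp

lemma shiftRight_shiftRight (x : Int) (a b : Nat) : (x >>> a) >>> b = x >>> (a+b) := by
  cases x with
  | ofNat nn =>
    show Int.ofNat ((nn >>> a) >>> b) = Int.ofNat (nn >>> (a+b))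
    rw [Nat.shiftRight_add]
  | negSucc mm =>
    show Int.negSucc ((mm >>> a) >>> b) = Int.negSucc (mm >>> (a+b))
    rw [Nat.shiftRight_add]

-- binary decomposition: x = 2 * (x >> 1) + (x & 1)
lemma shiftRight_one_eq_floordiv (x : Int) : x >>> (1:Nat) = PySem.Int.floordiv x 2 := by
  cases x with
  | ofNat nn =>
    have h : PySem.Int.floordiv (Int.ofNat nn) 2 = ((nn / 2 : Nat) : Int) := by
      rw [Int.ofNat_eq_natCast]
      exact_mod_cast PySem.Int.floordiv_natCast nn 2
    rw [h]
    show Int.ofNat (nn >>> 1) = _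
    simp only [Nat.shiftRight_one, Int.ofNat_eq_natCast]
  | negSucc mm =>
    have h : PySem.Int.floordiv (Int.negSucc mm) 2 = (Int.negSucc mm) / 2 :=
      PySem.Int.floordiv_eq_ediv_of_pos (by norm_num)
    rw [h]
    show Int.negSucc (mm >>> 1) = _
    simp only [Int.negSucc_eq, Nat.shiftRight_one]
    omega

lemma shift_decomp (x : Int) : x = 2 * (x >>> (1:Nat)) + PySem.Int.band x 1 := by
  have h := PySem.Int.floordiv_mul_add_mod x 2
  rw [PySem.Int.band_one, shiftRight_one_eq_floordiv]
  omega

-- (x + 2^p) >> p = (x >> p) + 1, unconditionally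
lemma shiftRight_add_pow (x : Int) (p : Nat) : (x + 2^p) >>> p = (x >>> p) + 1 := by
  have h2 : ((2:Int)^p) = ((2^p : Nat) : Int) := by push_cast; ring
  have hp : (0:Nat) < 2^p := Nat.two_pow_pos p
  cases x with
  | ofNat nn =>
    have hcast : (Int.ofNat nn + 2^p) = Int.ofNat (nn + 2^p) := by
      rw [h2]; exact_mod_cast rfl
    rw [hcast]
    show Int.ofNat ((nn + 2^p) >>> p) = Int.ofNat (nn >>> p) + 1
    have h3 : (nn + 2^p) >>> p = nn >>> p + 1 := by
      simp only [Nat.shiftRight_eq_div_pow]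
      exact Nat.add_div_right nn hp
    rw [h3]; exact_mod_cast rfl
  | negSucc mm =>
    by_cases hm : mm < 2^p
    · have hcast : (Int.negSucc mm + 2^p) = Int.ofNat (2^p - (mm+1)) := by
        rw [Int.negSucc_eq, h2, Int.ofNat_eq_natCast]
        have h3 : mm + 1 ≤ 2^p := hm
        omega
      rw [hcast]
      show Int.ofNat ((2^p - (mm+1)) >>> p) = Int.negSucc (mm >>> p) + 1
      have hz : (2^p - (mm+1)) >>> p = 0 := by
        simp only [Nat.shiftRight_eq_div_pow]
        exact Nat.div_eq_of_lt (by omega)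
      have hz2 : mm >>> p = 0 := by
        simp only [Nat.shiftRight_eq_div_pow]
        exact Nat.div_eq_of_lt hm
      rw [hz, hz2]
      rfl
    · have hm' : 2^p ≤ mm := Nat.le_of_not_lt hm
      have hcast : (Int.negSucc mm + 2^p) = Int.negSucc (mm - 2^p) := by
        rw [Int.negSucc_eq, Int.negSucc_eq, h2]
        omega
      rw [hcast]
      show Int.negSucc ((mm - 2^p) >>> p) = Int.negSucc (mm >>> p) + 1
      have hdiv : mm >>> p = (mm - 2^p) >>> p + 1 := by
        simp only [Nat.shiftRight_eq_div_pow]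
        have h4 := Nat.add_div_right (mm - 2^p) hp
        have h5 : mm - 2^p + 2^p = mm := by omega
        rw [h5] at h4
        omega
      rw [hdiv, Int.negSucc_eq, Int.negSucc_eq]
      push_cast
      ring

-- (2*t + b) >> 1 = t for b = 0 or 1
lemma shiftRight_one_of_decomp (t b : Int) (hb : b = 0 ∨ b = 1) :
    (2*t + b) >>> (1:Nat) = t := by
  rw [shiftRight_one_eq_floordiv]
  rcases hb with h | h <;> subst h <;>
    exact (PySem.Int.floordiv_eq_iff_of_pos (by norm_num)).2 ⟨by linarith, by linarith⟩

-- 0 < x >> j ⟺ 2^j ≤ x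
lemma pos_shiftRight_iff (x : Int) (j : Nat) : (0 < x >>> j) ↔ (2:Int)^j ≤ x := by
  have hp : (0:Nat) < 2^j := Nat.two_pow_pos j
  have hc : ((2:Int)^j) = ((2^j : Nat) : Int) := by push_cast; ring
  cases x with
  | ofNat a =>
    have hN : 0 < a >>> j ↔ 2^j ≤ a := by
      simp only [Nat.shiftRight_eq_div_pow]
      constructor
      · intro h
        by_contra hcc
        rw [Nat.div_eq_of_lt (by omega)] at h
        omega
      · intro h
        exact Nat.div_pos h hp
    show (0 < Int.ofNat (a >>> j)) ↔ (2:Int)^j ≤ Int.ofNat a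
    simp only [Int.ofNat_eq_natCast, hc]
    exact_mod_cast hN
  | negSucc a =>
    have h1 : Int.negSucc a >>> j = Int.negSucc (a >>> j) := rfl
    have h2 := Int.negSucc_lt_zero (a >>> j)
    have h3 := Int.negSucc_lt_zero a
    have h4 : (0:Int) < 2^j := by positivity
    rw [h1]
    constructor
    · intro h; omega
    · intro h; omega

-- A's guard 2^j < n ⟺ B's guard 0 < (n-1) >> j
lemma guard_iff (n : Int) (j : Nat) : ((2:Int)^j < n) ↔ 0 < (n-1) >>> j := by
  rw [pos_shiftRight_iff]
  omega

-- the chain: bit p of x set ⟺ (x >> p) & 1 ≠ 0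
lemma band_pow_iff_shift (x : Int) (p : Nat) :
    (PySem.Int.band (2^p) x = 0) ↔ PySem.Int.band (x >>> p) 1 = 0 := by
  rw [band_pow_eq_zero, band_one_eq_zero, shiftRight_testBit_zero]

-- MAIN SIMULATION: with equal fuel, A's walk at state (xa, bit_x = 2^p, bit_n = 2^j)
-- computes B's recursion on the shifted arguments, reassembled over the low bits of xa
lemma main_sim (n : Int) : ∀ (fuel : Nat) (xa : Int) (p j : Nat),
    minEndLoop fuel n xa (2^p) (2^j)
      = scatterRec fuel ((n-1) >>> j) (xa >>> p) * 2^p + (xa - (xa >>> p) * 2^p) := by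
  intro fuel
  induction fuel with
  | zero =>
    intro xa p j
    show xa = _
    simp only [scatterRec]
    ring
  | succ fuel ih =>
    intro xa p j
    simp only [minEndLoop, scatterRec]
    by_cases hg : (2:Int)^j < n
    · have hg' : 0 < (n-1) >>> j := (guard_iff n j).1 hg
      rw [if_pos hg, if_neg (by omega : ¬ (n-1) >>> j ≤ 0)]
      by_cases hb : PySem.Int.band (2^p) xa = 0
      · -- bit p of xa is clear: A consumes a bit of n-1, B takes the even branch
        have hb1 : PySem.Int.band (xa >>> p) 1 = 0 := (band_pow_iff_shift xa p).1 hb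
        rw [if_pos hb]
        -- A's added bit as the integer b = ((n-1) >> j) & 1
        set b : Int := PySem.Int.band ((n-1) >>> j) 1 with hbdef
        have hb01 : b = 0 ∨ b = 1 := band1_dichotomy _
        have hxa' : (if PySem.Int.band (2^j) (n-1) ≠ 0 then xa + 2^p else xa) = xa + b * 2^p := by
          by_cases ht : PySem.Int.band (2^j) (n-1) = 0
          · have hbz : b = 0 := (band_pow_iff_shift (n-1) j).1 ht
            rw [if_neg (by simpa using ht), hbz]; ring
          · have hbz : b ≠ 0 := fun hcc => ht ((band_pow_iff_shift (n-1) j).2 hcc)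
            have hbone : b = 1 := by rcases hb01 with h | h; exact absurd h hbz; exact h
            rw [if_pos ht, hbone]; ring
        rw [hxa', if_neg (fun hcc => hcc hb1), pow_shift_one, pow_shift_one,
            ih (xa + b * 2^p) (p+1) (j+1)]
        have he' : xa >>> p = 2 * ((xa >>> p) >>> (1:Nat)) := by
          have hd := shift_decomp (xa >>> p)
          rw [hb1] at hd
          omega
        have hshift1 : (xa + b * 2^p) >>> p = (xa >>> p) + b := by
          rcases hb01 with h | h
          · rw [h]; norm_num
          · rw [h, one_mul, shiftRight_add_pow]
        have hshift2 : (xa + b * 2^p) >>> (p+1) = (xa >>> p) >>> (1:Nat) := by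
          rw [← shiftRight_shiftRight _ p 1, hshift1]
          have h9 : (xa >>> p) + b = 2 * ((xa >>> p) >>> (1:Nat)) + b := by omega
          rw [h9]
          exact shiftRight_one_of_decomp _ b hb01
        have hm1 : ((n-1) >>> j) >>> (1:Nat) = (n-1) >>> (j+1) := shiftRight_shiftRight _ j 1
        rw [hshift2, hm1]
        have h2p : ((2:Int)^(p+1)) = 2 * 2^p := by ring
        rw [h2p]
        linear_combination (2:Int)^p * he'
      · -- bit p of xa is set: A skips, B takes the odd branch
        have hb1 : PySem.Int.band (xa >>> p) 1 ≠ 0 := fun hcc => hb ((band_pow_iff_shift xa p).2 hcc)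
        have hb1' : PySem.Int.band (xa >>> p) 1 = 1 := by
          rcases band1_dichotomy (xa >>> p) with h | h; exact absurd h hb1; exact h
        rw [if_neg hb, if_pos hb1, pow_shift_one, ih xa (p+1) j,
            ← shiftRight_shiftRight xa p 1]
        have he : xa >>> p = 2 * ((xa >>> p) >>> (1:Nat)) + 1 := by
          have hd := shift_decomp (xa >>> p)
          rw [hb1'] at hd
          omega
        have h2p : ((2:Int)^(p+1)) = 2 * 2^p := by ring
        rw [h2p]
        linear_combination (2:Int)^p * he
    · -- both guards fail: A returns xa, B returns xa >> p, reassembled = xa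
      have hg' : (n-1) >>> j ≤ 0 := by
        by_contra hcc
        exact hg ((guard_iff n j).2 (by omega))
      rw [if_neg hg, if_pos hg']
      ring

lemma ports_equal (n x : Int) : min_end n x = min_end_alt n x := by
  show minEndLoop pvFuel n x 1 1 = _
  have h1 : (1:Int) = 2^(0:Nat) := by norm_num
  rw [h1, main_sim n pvFuel x 0 0, shiftRight_zero_int, shiftRight_zero_int]
  show _ = (peelLoop pvFuel (n-1) x).1.reverse.foldl (fun acc b => 2 * acc + b) (peelLoop pvFuel (n-1) x).2
  rw [rebuild_peel]
  norm_num

-- ===== VERDICT (by name: the statement is the Claim_ definition above) =====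
theorem min_end_spec : Claim_equal_min_end := by
  intro n x _
  show min_end n x = min_end_alt n x
  exact ports_equal n x
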